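-- pv_equiv track=rewrite | github.com/xianju6x/m1_microcode | get_fallthru.py | gather_dict
-- ===== SOURCE A (Python) =====
-- def gather_dict(raw_list):
--     fall_all = []
--     length = len(raw_list)
--     i = 0
--     while i < length-2:
--         if 'FALLTHRU' in raw_list[i]:
--             fall_dict ={}
--             key = raw_list[i].split()[0]
--             fall_dict[key] = []
--             while 'FALLTHRU' in raw_list[i]:
--                 fall_dict[key].append(raw_list[i+1].split()[0])
--                 i += 1
--             fall_all.append(fall_dict)
--         i += 1
--     return fall_all
-- ===== SOURCE B (Python) =====
-- def gather_dict(raw_list):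
--     n = len(raw_list)
--     flags = ['FALLTHRU' in line for line in raw_list]
--     runs = []
--     start = None
--     for i, f in enumerate(flags):
--         if f:
--             if start is None:
--                 start = i
--         elif start is not None:
--             runs.append((start, i))
--             start = None
--     if start is not None:
--         runs.append((start, n))
--     return [{raw_list[s].split()[0]: [raw_list[j + 1].split()[0] for j in range(s, e)]}
--             for (s, e) in runs if s < n - 2]
-- ===== Notes on version B (the rewrite author's own statement) =====
-- stated objective: alternative
-- what changed: Replaces A's nested while-loops with index mutation by a two-phase decomposition: one pass computes the maximal FALLTHRU runs as (start, end) pairs, then a comprehension builds one dict per run whose start index is < len-2.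
import Mathlib
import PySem

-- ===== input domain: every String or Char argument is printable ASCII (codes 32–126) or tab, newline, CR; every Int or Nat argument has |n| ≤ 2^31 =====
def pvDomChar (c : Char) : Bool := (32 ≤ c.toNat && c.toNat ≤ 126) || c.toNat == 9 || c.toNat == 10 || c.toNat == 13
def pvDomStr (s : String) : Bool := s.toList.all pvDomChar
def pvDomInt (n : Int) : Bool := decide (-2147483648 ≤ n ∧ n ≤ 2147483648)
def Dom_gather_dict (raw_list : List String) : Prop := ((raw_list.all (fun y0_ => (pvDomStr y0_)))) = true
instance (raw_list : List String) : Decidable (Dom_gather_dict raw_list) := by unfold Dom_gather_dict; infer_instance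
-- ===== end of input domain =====

-- B replaces A's nested while-loops with a two-phase decomposition (compute maximal
-- FALLTHRU runs, then build one dict per qualifying run); same cost, no speed claim.

-- ===== PORT A =====
-- 'FALLTHRU' in s
def hasFall (s : String) : Bool := PySem.Str.isIn "FALLTHRU" s
-- s.split()[0]; the [0] indexing is ported as headD "" — the empty-split case (IndexError) is excluded by Pre_
def firstTok (s : String) : String := (PySem.Str.split₀ s).headD ""
-- raw_list[j]; default "" is only reached where Python raises IndexError, excluded by Pre_
def pyAt (raw : List String) (j : Int) : String := PySem.List.pyGetD raw j ""

-- inner 'while FALLTHRU in raw_list[i]: fall_dict[key].append(raw_list[i+1].split()[0]); i += 1'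
-- (the i < length guard only makes the recursion total; Python raises before reaching i = length under ¬Pre_)
def gdInner (raw : List String) (i : Nat) (acc : List String) : Nat × List String :=
  if h : i < raw.length ∧ hasFall (pyAt raw (i : Int)) = true then
    gdInner raw (i + 1) (acc ++ [firstTok (pyAt raw ((i : Int) + 1))])
  else (i, acc)
termination_by raw.length - i
decreasing_by omega

theorem gdInner_ge (raw : List String) (i : Nat) (acc : List String) :
    i ≤ (gdInner raw i acc).1 := by
  fun_induction gdInner with
  | case1 i acc h ih => omega
  | case2 i acc h => simp

-- outer 'while i < length-2: …'
def gdOuter (raw : List String) (i : Nat)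
    (acc : List (List (String × List String))) : List (List (String × List String)) :=
  if h : (i : Int) < (raw.length : Int) - 2 then
    if hasFall (pyAt raw (i : Int)) then
      let r := gdInner raw i []
      gdOuter raw (r.1 + 1) (acc ++ [[(firstTok (pyAt raw (i : Int)), r.2)]])
    else gdOuter raw (i + 1) acc
  else acc
termination_by raw.length - i
decreasing_by
  · have := gdInner_ge raw i []; omega
  · omega

def gather_dict (raw_list : List String) : List (List (String × List String)) :=
  gdOuter raw_list 0 []

-- ===== PORT B =====
def gdFlags (raw : List String) : List Bool := raw.map hasFall

-- loop body of 'for i, f in enumerate(flags): …'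
def gdStep (st : List (Int × Int) × Option Int) (p : Int × Bool) : List (Int × Int) × Option Int :=
  if p.2 then
    match st.2 with
    | none => (st.1, some p.1)
    | some s => (st.1, some s)
  else
    match st.2 with
    | none => (st.1, none)
    | some s => (st.1 ++ [(s, p.1)], none)

def gather_dict_alt (raw_list : List String) : List (List (String × List String)) :=
  let n : Int := raw_list.length
  let st := (PySem.List.enumerate (gdFlags raw_list) 0).foldl gdStep ([], none)
  let runs := match st.2 with
    | some s => st.1 ++ [(s, n)]
    | none => st.1
  (runs.filter (fun p => p.1 < n - 2)).map (fun p =>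
    [(firstTok (pyAt raw_list p.1),
      (PySem.List.pyRange p.1 p.2 1).map (fun j => firstTok (pyAt raw_list (j + 1))))])

-- ===== PRECONDITION & SPEC =====
-- Pre_ excludes exactly the inputs on which Python A raises IndexError: some index j in a
-- FALLTHRU run starting before length-2 is the last line, or is followed by a whitespace-only line.
def Pre_gather_dict (raw_list : List String) : Prop :=
  ∀ j, j < raw_list.length →
    hasFall (raw_list.getD j "") = true →
    (∃ s, s < j + 1 ∧ (s : Int) < (raw_list.length : Int) - 2 ∧
      ∀ k, k ≤ j → s ≤ k → hasFall (raw_list.getD k "") = true) →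
    j + 1 < raw_list.length ∧ PySem.Str.split₀ (raw_list.getD (j + 1) "") ≠ []
instance (raw_list : List String) : Decidable (Pre_gather_dict raw_list) := by
  unfold Pre_gather_dict; infer_instance

def pvWitness_gather_dict : List String := ["a FALLTHRU", "b x", "c", "d"]

def Spec_gather_dict (raw_list : List String) (out : List (List (String × List String))) : Prop := out = gather_dict_alt raw_list
instance (raw_list : List String) (out : List (List (String × List String))) : Decidable (Spec_gather_dict raw_list out) := by unfold Spec_gather_dict; infer_instance

-- ===== CLAIM (what is proved, stated in full; the proofs are below) =====
def Claim_equal_gather_dict : Prop := ∀ (raw_list : List String), Dom_gather_dict raw_list → Pre_gather_dict raw_list → Spec_gather_dict raw_list (gather_dict raw_list)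

-- ===== LEMMAS AND PROOFS =====

-- first index e ≥ i at which the FALLTHRU run starting at i stops (e = length if it reaches the end)
def runEnd (raw : List String) (i : Nat) : Nat :=
  if h : i < raw.length ∧ hasFall (pyAt raw (i : Int)) = true then runEnd raw (i + 1) else i
termination_by raw.length - i
decreasing_by omega

theorem runEnd_ge (raw : List String) (i : Nat) : i ≤ runEnd raw i := by
  fun_induction runEnd with
  | case1 i h ih => omega
  | case2 i h => simp

-- gdInner computes (runEnd, acc ++ the tokens of lines i+1 .. runEnd)
theorem gdInner_eq (raw : List String) (i : Nat) (acc : List String) :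
    gdInner raw i acc =
      (runEnd raw i,
       acc ++ (PySem.List.pyRange (i : Int) (runEnd raw i : Int) 1).map
         (fun j => firstTok (pyAt raw (j + 1)))) := by
  fun_induction gdInner with
  | case1 i acc h ih =>
      have hE : runEnd raw i = runEnd raw (i + 1) := by
        conv_lhs => rw [runEnd]
        simp [h]
      have h1 : (i : Int) < (runEnd raw i : Int) := by
        have := runEnd_ge raw (i + 1); omega
      rw [ih, PySem.List.pyRange_one_cons h1, hE]
      push_cast
      simp
  | case2 i acc h =>
      rw [runEnd]; simp [h, PySem.List.pyRange_one_eq_nil]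

-- pure recursive description of B's run-finding fold
def runsSpec (fl : List Bool) (idx : Int) (cur : Option Int) : List (Int × Int) :=
  match fl with
  | [] => match cur with
    | some s => [(s, idx)]
    | none => []
  | b :: rest =>
    match cur, b with
    | none, true => runsSpec rest (idx + 1) (some idx)
    | none, false => runsSpec rest (idx + 1) none
    | some s, true => runsSpec rest (idx + 1) (some s)
    | some s, false => (s, idx) :: runsSpec rest (idx + 1) none

-- the fold over enumerate, finalized, is runsSpec
theorem foldl_gdStep_eq (fl : List Bool) (idx : Int) (rs : List (Int × Int)) (cur : Option Int) :
    (let st := (PySem.List.enumerate fl idx).foldl gdStep (rs, cur)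
     match st.2 with
     | some s => st.1 ++ [(s, idx + fl.length)]
     | none => st.1) = rs ++ runsSpec fl idx cur := by
  induction fl generalizing idx rs cur with
  | nil =>
      cases cur <;> simp [PySem.List.enumerate_nil, runsSpec]
  | cons b rest ih =>
      rw [PySem.List.enumerate_cons]
      simp only [List.foldl_cons]
      cases cur with
      | none =>
          cases b with
          | true =>
              have h := ih (idx + 1) rs (some idx)
              simp only [gdStep, runsSpec, if_true, List.length_cons] at h ⊢
              push_cast
              rw [show idx + ((rest.length : Int) + 1) = idx + 1 + (rest.length : Int) by ring]
              exact h
          | false =>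
              have h := ih (idx + 1) rs none
              simp only [gdStep, runsSpec, Bool.false_eq_true, if_false, List.length_cons] at h ⊢
              push_cast
              rw [show idx + ((rest.length : Int) + 1) = idx + 1 + (rest.length : Int) by ring]
              exact h
      | some s =>
          cases b with
          | true =>
              have h := ih (idx + 1) rs (some s)
              simp only [gdStep, runsSpec, if_true, List.length_cons] at h ⊢
              push_cast
              rw [show idx + ((rest.length : Int) + 1) = idx + 1 + (rest.length : Int) by ring]
              exact h
          | false =>
              have h := ih (idx + 1) (rs ++ [(s, idx)]) none
              simp only [gdStep, runsSpec, Bool.false_eq_true, if_false, List.length_cons] at h ⊢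
              push_cast
              rw [show idx + ((rest.length : Int) + 1) = idx + 1 + (rest.length : Int) by ring]
              rw [h, List.append_assoc]
              simp

-- every run produced from a clean state starts at an index ≥ the current position
theorem runsSpec_start_ge (fl : List Bool) (idx : Int) (cur : Option Int)
    (hc : ∀ s, cur = some s → s ≤ idx) :
    ∀ p ∈ runsSpec fl idx cur, (cur.elim idx id) ≤ p.1 := by
  induction fl generalizing idx cur with
  | nil =>
      cases cur with
      | none => simp [runsSpec]
      | some s => simp [runsSpec]
  | cons b rest ih =>
      cases cur with
      | none =>
          cases b with
          | true =>
              intro p hp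
              have := ih (idx + 1) (some idx) (by intro s hs; cases hs; omega) p hp
              simpa using this
          | false =>
              intro p hp
              have := ih (idx + 1) none (by intro s hs; cases hs) p hp
              simp at this ⊢
              omega
      | some s =>
          have hs : s ≤ idx := hc s rfl
          cases b with
          | true =>
              intro p hp
              have := ih (idx + 1) (some s) (by intro t ht; cases ht; omega) p hp
              simpa using this
          | false =>
              intro p hp
              simp only [runsSpec, List.mem_cons] at hp
              cases hp with
              | inl h => subst h; simp
              | inr h =>
                  have := ih (idx + 1) none (by intro t ht; cases ht) p h
                  simp at this ⊢
                  omega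

-- drop a false flag at the head of a clean state
theorem runsSpec_drop_false (raw : List String) (i : Nat) (hi : i < raw.length)
    (hf : hasFall (pyAt raw (i : Int)) = false) :
    runsSpec ((gdFlags raw).drop i) (i : Int) none =
    runsSpec ((gdFlags raw).drop (i + 1)) ((i : Int) + 1) none := by
  have hlen : i < (gdFlags raw).length := by simpa [gdFlags] using hi
  have hgd : (gdFlags raw)[i] = hasFall (pyAt raw (i : Int)) := by
    simp [gdFlags, pyAt, PySem.List.pyGetD_natCast, List.getD_eq_getElem?_getD,
      List.getElem?_eq_getElem hi]
  rw [List.drop_eq_getElem_cons hlen, hgd, hf]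
  simp [runsSpec]

-- a run in progress (state some s) closes at runEnd
theorem runsSpec_some (raw : List String) (i : Nat) (hi : i ≤ raw.length) (s : Int) :
    runsSpec ((gdFlags raw).drop i) (i : Int) (some s) =
    (s, (runEnd raw i : Int)) ::
      runsSpec ((gdFlags raw).drop (runEnd raw i + 1)) ((runEnd raw i : Int) + 1) none := by
  fun_induction runEnd raw i with
  | case1 i h ih =>
      have hlen : i < (gdFlags raw).length := by simp [gdFlags]; omega
      have hgd : (gdFlags raw)[i] = hasFall (pyAt raw (i : Int)) := by
        simp [gdFlags, pyAt, PySem.List.pyGetD_natCast, List.getD_eq_getElem?_getD,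
          List.getElem?_eq_getElem h.1]
      rw [List.drop_eq_getElem_cons hlen, hgd, h.2]
      have := ih (by omega)
      simp only [runsSpec]
      push_cast at this ⊢
      exact this
  | case2 i h =>
      rcases Nat.lt_or_ge i raw.length with hlt | hge
      · have hf : hasFall (pyAt raw (i : Int)) = false := by
          rcases h' : hasFall (pyAt raw (i : Int)) with _ | _
          · rfl
          · exact absurd ⟨hlt, h'⟩ h
        have hlen : i < (gdFlags raw).length := by simpa [gdFlags] using hlt
        have hgd : (gdFlags raw)[i] = hasFall (pyAt raw (i : Int)) := by
          simp [gdFlags, pyAt, PySem.List.pyGetD_natCast, List.getD_eq_getElem?_getD,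
            List.getElem?_eq_getElem hlt]
        rw [List.drop_eq_getElem_cons hlen, hgd, hf]
        simp [runsSpec]
      · have hieq : i = raw.length := by omega
        have hd : (gdFlags raw).drop i = [] := by
          apply List.drop_eq_nil_of_le; simp [gdFlags]; omega
        have hd2 : (gdFlags raw).drop (i + 1) = [] := by
          apply List.drop_eq_nil_of_le; simp [gdFlags]; omega
        rw [hd, hd2]
        simp [runsSpec]

-- head-run decomposition of runsSpec at a true flag
theorem runsSpec_head_run (raw : List String) (i : Nat) (hi : i < raw.length)
    (hf : hasFall (pyAt raw (i : Int)) = true) :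
    runsSpec ((gdFlags raw).drop i) (i : Int) none =
    ((i : Int), (runEnd raw i : Int)) ::
      runsSpec ((gdFlags raw).drop (runEnd raw i + 1)) ((runEnd raw i : Int) + 1) none := by
  have hlen : i < (gdFlags raw).length := by simpa [gdFlags] using hi
  have hgd : (gdFlags raw)[i] = hasFall (pyAt raw (i : Int)) := by
    simp [gdFlags, pyAt, PySem.List.pyGetD_natCast, List.getD_eq_getElem?_getD,
      List.getElem?_eq_getElem hi]
  have hE : runEnd raw i = runEnd raw (i + 1) := by
    conv_lhs => rw [runEnd]
    simp [hi, hf]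
  rw [List.drop_eq_getElem_cons hlen, hgd, hf]
  have := runsSpec_some raw (i + 1) (by omega) (i : Int)
  simp only [runsSpec]
  rw [hE]
  push_cast at this ⊢
  exact this

-- main loop correspondence
theorem gdOuter_eq (raw : List String) (i : Nat)
    (acc : List (List (String × List String))) :
    gdOuter raw i acc = acc ++
      ((runsSpec ((gdFlags raw).drop i) (i : Int) none).filter
        (fun p => p.1 < (raw.length : Int) - 2)).map (fun p =>
          [(firstTok (pyAt raw p.1),
            (PySem.List.pyRange p.1 p.2 1).map (fun j => firstTok (pyAt raw (j + 1))))]) := by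
  fun_induction gdOuter with
  | case1 i acc h hf r ih =>
      have hi : i < raw.length := by omega
      have hr : gdInner raw i [] = (runEnd raw i,
          (PySem.List.pyRange (i : Int) (runEnd raw i : Int) 1).map
            (fun j => firstTok (pyAt raw (j + 1)))) := by
        rw [gdInner_eq]; simp
      have hr' : r = (runEnd raw i,
          (PySem.List.pyRange (i : Int) (runEnd raw i : Int) 1).map
            (fun j => firstTok (pyAt raw (j + 1)))) := hr
      rw [ih, runsSpec_head_run raw i hi hf]
      rw [List.filter_cons_of_pos (by simp; omega)]
      rw [List.map_cons, hr']
      push_cast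
      simp [List.append_assoc]
  | case2 i acc h hf ih =>
      have hi : i < raw.length := by omega
      rw [ih, runsSpec_drop_false raw i hi (by simpa using hf)]
      push_cast
      rfl
  | case3 i acc h =>
      have : ((runsSpec ((gdFlags raw).drop i) (i : Int) none).filter
          (fun p => p.1 < (raw.length : Int) - 2)) = [] := by
        rw [List.filter_eq_nil_iff]
        intro p hp
        have := runsSpec_start_ge ((gdFlags raw).drop i) (i : Int) none
          (by intro s hs; cases hs) p hp
        simp only [Option.elim] at this
        simp only [decide_eq_true_eq, not_lt]
        omega
      rw [this]
      simp

-- ===== VERDICT (by name: the statement is the Claim_ definition above) =====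
theorem gather_dict_spec : Claim_equal_gather_dict := by
  intro raw _ _
  unfold Spec_gather_dict gather_dict gather_dict_alt
  rw [gdOuter_eq raw 0 []]
  have h := foldl_gdStep_eq (gdFlags raw) 0 [] none
  simp only [gdFlags, List.length_map, zero_add, List.nil_append] at h
  simp only [gdFlags] at h ⊢
  rw [h]
  simp
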